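-- pv_equiv track=rewrite | github.com/CCJK123/Advent-of-Code-2021 | code/day_10.py | day_10
-- ===== SOURCE A (Python) =====
-- def day_10(input_str):
--     # Initial Setup
--     input_array = input_str.split("\n")
--     bracket_pairs = {
--         "(": ")",
--         "[": "]",
--         "{": "}",
--         "<": ">"
--     }
--     outputs = []
--
--     # Part 1
--     error_score = {
--         ")": 3,
--         "]": 57,
--         "}": 1197,
--         ">": 25137
--     }
--     total_score = 0
--     incomplete = input_array.copy() # for part 2
--     for line in input_array:
--         stack = []
--         for bracket in line:
--             if bracket in bracket_pairs.keys():
--                 stack.append(bracket)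
--             elif bracket in bracket_pairs.values():
--                 last_open_bracket = stack.pop()
--                 if bracket != bracket_pairs[last_open_bracket]:
--                     total_score += error_score[bracket]
--                     incomplete.remove(line) # for part 2
--                     break
--     outputs.append(total_score)
--
--     # Part 2
--     autocomp_score = {
--         ")": 1,
--         "]": 2,
--         "}": 3,
--         ">": 4
--     }
--     total_scores = [0]*len(incomplete)
--     for i in range(len(incomplete)):
--         line = incomplete[i]
--         stack = []
--         for bracket in line:
--             if bracket in bracket_pairs.keys():
--                 stack.append(bracket)
--             elif bracket in bracket_pairs.values():
--                 _ = stack.pop()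
--         stack.reverse()
--         for bracket in stack:
--             total_scores[i] *= 5
--             total_scores[i] += autocomp_score[bracket_pairs[bracket]]
--     total_scores.sort()
--     outputs.append(total_scores[int((len(incomplete)-1)/2)])
--
--     return outputs
-- ===== SOURCE B (Python) =====
-- def day_10(input_str):
--     pairs = {"(": ")", "[": "]", "{": "}", "<": ">"}
--     err = {")": 3, "]": 57, "}": 1197, ">": 25137}
--     comp = {")": 1, "]": 2, "}": 3, ">": 4}
--     error_total = 0
--     completions = []
--     for line in input_str.split("\n"):
--         stack = []  # expected closers, top last
--         corrupt = None
--         for ch in line: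
--             if ch in pairs:
--                 stack.append(pairs[ch])
--             elif ch in err:
--                 expected = stack.pop()
--                 if ch != expected:
--                     corrupt = err[ch]
--                     break
--         if corrupt is None:
--             score = 0
--             while stack:
--                 score = score * 5 + comp[stack.pop()]
--             completions.append(score)
--         else:
--             error_total += corrupt
--     completions.sort()
--     return [error_total, completions[(len(completions) - 1) // 2]]
-- ===== Notes on version B (the rewrite author's own statement) =====
-- stated objective: faster
-- what changed: One pass per line pushing expected closers and scoring the leftover stack directly replaces A's incomplete=copy()+list.remove scans and a full second scan of every incomplete line.
import Mathlib
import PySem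

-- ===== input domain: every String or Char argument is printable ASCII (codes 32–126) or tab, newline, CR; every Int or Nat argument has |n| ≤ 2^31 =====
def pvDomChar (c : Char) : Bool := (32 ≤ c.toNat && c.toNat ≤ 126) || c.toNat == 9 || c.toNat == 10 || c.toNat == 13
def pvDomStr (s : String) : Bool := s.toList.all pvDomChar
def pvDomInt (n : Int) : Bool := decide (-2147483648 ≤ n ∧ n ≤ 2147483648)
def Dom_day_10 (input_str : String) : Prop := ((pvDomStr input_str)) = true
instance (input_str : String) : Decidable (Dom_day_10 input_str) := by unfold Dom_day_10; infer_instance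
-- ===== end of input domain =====

-- B replaces A's copy-then-remove bookkeeping and second scan of every incomplete line by a single
-- pass per line that pushes the EXPECTED closers and scores the leftover stack directly (no
-- list.remove scan over the line list, no second scan of the incomplete lines).

-- bracket tables shared by both ports (the literal dicts both Pythons declare)
def pvIsOpen (c : Char) : Bool := c = '(' || c = '[' || c = '{' || c = '<'
def pvIsClose (c : Char) : Bool := c = ')' || c = ']' || c = '}' || c = '>'
def pvCloseOf (c : Char) : Char := if c = '(' then ')' else if c = '[' then ']' else if c = '{' then '}' else '>'
def pvErrScore (c : Char) : Int := if c = ')' then 3 else if c = ']' then 57 else if c = '}' then 1197 else 25137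
def pvCompScore (c : Char) : Int := if c = ')' then 1 else if c = ']' then 2 else if c = '}' then 3 else 4

-- ===== PORT A =====
-- A's part-1 inner loop: stack of OPEN brackets (Python appends/pops at the end = Lean cons/head);
-- returns the error score at the first mismatching closer ("break"), none if the loop runs out.
-- A closer on an empty stack is stack.pop() raising IndexError in Python; outside Pre_ (we return none).
def pvScanA : List Char → List Char → Option Int
  | [], _ => none
  | c :: rest, st =>
    if pvIsOpen c then pvScanA rest (c :: st)
    else if pvIsClose c then
      match st with
      | [] => none            -- Python: IndexError; outside Pre_
      | t :: st' => if c ≠ pvCloseOf t then some (pvErrScore c) else pvScanA rest st'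
    else pvScanA rest st

-- A's part-1 loop over the lines, carrying (total_score, incomplete); incomplete.remove(line) is
-- PySem.List.remove? (its ValueError branch is unreachable: incomplete starts as a copy, so getD is exact).
def pvPart1A : List (List Char) → Int → List (List Char) → Int × List (List Char)
  | [], total, inc => (total, inc)
  | l :: rest, total, inc =>
    match pvScanA l [] with
    | some s => pvPart1A rest (total + s) ((PySem.List.remove? inc l).getD inc)
    | none => pvPart1A rest total inc

-- A's part-2 first loop: rebuild the leftover stack (stack.pop() never fails inside Pre_; tail totalizes).
def pvBuildA : List Char → List Char → List Char
  | [], st => st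
  | c :: rest, st =>
    if pvIsOpen c then pvBuildA rest (c :: st)
    else if pvIsClose c then pvBuildA rest st.tail
    else pvBuildA rest st

-- A's part-2 scoring loop: stack.reverse() then iterate end-pushed = iterate our cons-stack top-first.
def pvScoreA (st : List Char) : Int := st.foldl (fun s b => s * 5 + pvCompScore (pvCloseOf b)) 0

def day_10 (input_str : String) : List Int :=
  let input_array := PySem.Chars.splitOn input_str.toList ['\n']
  let p1 := pvPart1A input_array 0 input_array
  let total_scores := p1.2.map (fun l => pvScoreA (pvBuildA l []))
  let sorted := PySem.List.sorted total_scores (fun x => x)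
  -- int((len-1)/2) truncates toward zero = Int.tdiv; the IndexError when no line is incomplete is outside Pre_
  [p1.1, (PySem.List.pyGet? sorted (((p1.2.length : Int) - 1).tdiv 2)).getD 0]

-- ===== PORT B =====
-- B's single pass per line: push the EXPECTED closer; returns (error score if corrupted, leftover stack).
-- As in A, the closing-bracket-on-empty-stack IndexError is outside Pre_.
def pvLoopB : List Char → List Char → Option Int × List Char
  | [], st => (none, st)
  | c :: rest, st =>
    if pvIsOpen c then pvLoopB rest (pvCloseOf c :: st)
    else if pvIsClose c then
      match st with
      | [] => (none, [])      -- Python: IndexError; outside Pre_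
      | e :: st' => if c ≠ e then (some (pvErrScore c), st') else pvLoopB rest st'
    else pvLoopB rest st

def day_10_alt (input_str : String) : List Int :=
  let step := fun (acc : Int × List Int) (line : List Char) =>
    match pvLoopB line [] with
    | (some s, _) => (acc.1 + s, acc.2)
    | (none, st) => (acc.1, acc.2 ++ [st.foldl (fun s e => s * 5 + pvCompScore e) 0])
  let r := (PySem.Chars.splitOn input_str.toList ['\n']).foldl step (0, [])
  let sorted := PySem.List.sorted r.2 (fun x => x)
  [r.1, (PySem.List.pyGet? sorted (PySem.Int.floordiv ((r.2.length : Int) - 1) 2)).getD 0]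

-- ===== PRECONDITION & SPEC =====
-- status of a line: 0 = the scan runs to the end (incomplete/complete), 1 = the first offending closer
-- mismatches (corrupted; A breaks), 2 = a closer arrives on an empty stack before any mismatch (IndexError).
def pvStatus : List Char → List Char → Int
  | [], _ => 0
  | c :: rest, st =>
    if pvIsOpen c then pvStatus rest (c :: st)
    else if pvIsClose c then
      match st with
      | [] => 2
      | t :: st' => if c ≠ pvCloseOf t then 1 else pvStatus rest st'
    else pvStatus rest st

-- Pre_ excludes exactly the inputs where Python A raises: a line whose first offending closing bracket
-- arrives on an empty stack (IndexError from stack.pop()), and inputs where every line is corrupted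
-- (IndexError from indexing the empty autocomplete-score list). Both Pythons raise there.
def Pre_day_10 (input_str : String) : Prop :=
  (∀ l ∈ PySem.Chars.splitOn input_str.toList ['\n'], pvStatus l [] ≠ 2) ∧
  (∃ l ∈ PySem.Chars.splitOn input_str.toList ['\n'], pvStatus l [] = 0)
instance (input_str : String) : Decidable (Pre_day_10 input_str) := by unfold Pre_day_10; infer_instance

def pvWitness_day_10 : String := "([{}])\n(]\n<>"

def Spec_day_10 (input_str : String) (out : List Int) : Prop := out = day_10_alt input_str
instance (input_str : String) (out : List Int) : Decidable (Spec_day_10 input_str out) := by unfold Spec_day_10; infer_instance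

-- ===== CLAIM (what is proved, stated in full; the proofs are below) =====
def Claim_equal_day_10 : Prop := ∀ (input_str : String), Dom_day_10 input_str → Pre_day_10 input_str → Spec_day_10 input_str (day_10 input_str)

-- ===== LEMMAS AND PROOFS =====

theorem pvIsOpen_closeOf (t : Char) : pvIsOpen (pvCloseOf t) = false := by
  unfold pvCloseOf; split_ifs <;> decide

theorem pvIsClose_closeOf (t : Char) : pvIsClose (pvCloseOf t) = true := by
  unfold pvCloseOf; split_ifs <;> decide


theorem pvLine_fst (cs : List Char) : ∀ st, pvStatus cs st ≠ 2 →
    pvScanA cs st = (pvLoopB cs (st.map pvCloseOf)).1 ∧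
    (pvStatus cs st = 0 → pvScanA cs st = none ∧
      (pvLoopB cs (st.map pvCloseOf)).2 = (pvBuildA cs st).map pvCloseOf) := by
  induction cs with
  | nil => intro st h; simp [pvScanA, pvLoopB, pvBuildA, pvStatus]
  | cons c rest ih =>
    intro st h
    by_cases ho : pvIsOpen c
    · simpa [pvScanA, pvLoopB, pvBuildA, pvStatus, ho] using ih (c :: st) (by simpa [pvStatus, ho] using h)
    · by_cases hc : pvIsClose c
      · match st with
        | [] => simp [pvStatus, ho, hc] at h
        | t :: st' =>
          by_cases hne : c ≠ pvCloseOf t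
          · constructor
            · simp [pvScanA, pvLoopB, ho, hc, hne]
            · intro h0; simp [pvStatus, ho, hc, hne] at h0
          · rw [ne_eq, not_not] at hne
            subst hne
            simpa [pvScanA, pvLoopB, pvBuildA, pvStatus, pvIsOpen_closeOf, pvIsClose_closeOf] using
              ih st' (by simpa [pvStatus, pvIsOpen_closeOf, pvIsClose_closeOf] using h)
      · simpa [pvScanA, pvLoopB, pvBuildA, pvStatus, ho, hc] using ih st (by simpa [pvStatus, ho, hc] using h)


theorem remove_prefix {α : Type} [BEq α] [LawfulBEq α] (done : List α) (l : α) (rest : List α)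
    (h : l ∉ done) : PySem.List.remove? (done ++ l :: rest) l = some (done ++ rest) := by
  induction done with
  | nil => simp
  | cons x xs ih =>
    have hx : x ≠ l := by rintro rfl; simp at h
    rw [List.cons_append, PySem.List.remove?_cons_of_ne _ hx, ih (by simp_all)]
    rfl


theorem pvPart1A_inv (lines : List (List Char)) : ∀ (total : Int) (done : List (List Char)),
    (∀ l ∈ done, pvScanA l [] = none) →
    pvPart1A lines total (done ++ lines) =
      (total + ((lines.map (fun l => (pvScanA l []).getD 0)).sum),
       done ++ lines.filter (fun l => pvScanA l [] = none)) := by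
  induction lines with
  | nil => intro total done _; simp [pvPart1A]
  | cons l rest ih =>
    intro total done hdone
    cases hs : pvScanA l [] with
    | some s =>
      have hnm : l ∉ done := fun hm => by simp [hdone l hm] at hs
      rw [show done ++ l :: rest = done ++ l :: rest from rfl]
      simp only [pvPart1A, hs, remove_prefix done l rest hnm, Option.getD_some]
      rw [ih (total + s) done hdone]
      simp [hs, add_assoc]
    | none =>
      simp only [pvPart1A, hs]
      have := ih total (done ++ [l]) (by intro x hx; rcases List.mem_append.1 hx with h | h
                                         · exact hdone x h
                                         · simp at h; subst h; exact hs)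
      simp only [List.append_assoc, List.singleton_append] at this
      rw [this]
      simp [hs]


theorem pvScan_none_status (cs : List Char) : ∀ st, pvStatus cs st ≠ 2 → pvScanA cs st = none →
    pvStatus cs st = 0 := by
  induction cs with
  | nil => intro st _ _; simp [pvStatus]
  | cons c rest ih =>
    intro st h hn
    by_cases ho : pvIsOpen c
    · have h' : pvStatus rest (c :: st) ≠ 2 := by simpa [pvStatus, ho] using h
      have hn' : pvScanA rest (c :: st) = none := by simpa [pvScanA, ho] using hn
      simpa [pvStatus, ho] using ih (c :: st) h' hn'
    · by_cases hc : pvIsClose c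
      · match st with
        | [] => simp [pvStatus, ho, hc] at h
        | t :: st' =>
          by_cases hne : c ≠ pvCloseOf t
          · simp [pvScanA, ho, hc, hne] at hn
          · rw [ne_eq, not_not] at hne
            subst hne
            have h' : pvStatus rest st' ≠ 2 := by
              simpa [pvStatus, pvIsOpen_closeOf, pvIsClose_closeOf] using h
            have hn' : pvScanA rest st' = none := by
              simpa [pvScanA, pvIsOpen_closeOf, pvIsClose_closeOf] using hn
            simpa [pvStatus, pvIsOpen_closeOf, pvIsClose_closeOf] using ih st' h' hn'
      · have h' : pvStatus rest st ≠ 2 := by simpa [pvStatus, ho, hc] using h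
        have hn' : pvScanA rest st = none := by simpa [pvScanA, ho, hc] using hn
        simpa [pvStatus, ho, hc] using ih st h' hn'


theorem pvFoldB_inv (lines : List (List Char)) : ∀ (t : Int) (cs : List Int),
    lines.foldl (fun (acc : Int × List Int) (line : List Char) =>
      match pvLoopB line [] with
      | (some s, _) => (acc.1 + s, acc.2)
      | (none, st) => (acc.1, acc.2 ++ [st.foldl (fun s e => s * 5 + pvCompScore e) 0])) (t, cs) =
      (t + ((lines.map (fun l => ((pvLoopB l []).1).getD 0)).sum),
       cs ++ (lines.filter (fun l => (pvLoopB l []).1 = none)).map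
              (fun l => (pvLoopB l []).2.foldl (fun s e => s * 5 + pvCompScore e) 0)) := by
  induction lines with
  | nil => intro t cs; simp
  | cons l rest ih =>
    intro t cs
    cases hp : pvLoopB l [] with
    | mk fst snd =>
      cases fst with
      | some s =>
        simp only [List.foldl_cons, hp]
        rw [ih (t + s) cs]
        simp [hp, add_assoc]
      | none =>
        simp only [List.foldl_cons, hp]
        rw [ih t (cs ++ [snd.foldl (fun s e => s * 5 + pvCompScore e) 0])]
        simp [hp]


theorem pvMain (input_str : String)
    (h2 : ∀ l ∈ PySem.Chars.splitOn input_str.toList ['\n'], pvStatus l [] ≠ 2)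
    (h0 : ∃ l ∈ PySem.Chars.splitOn input_str.toList ['\n'], pvStatus l [] = 0) :
    day_10 input_str = day_10_alt input_str := by
  unfold day_10 day_10_alt
  dsimp only
  set lines := PySem.Chars.splitOn input_str.toList ['\n'] with hl
  have key : ∀ l ∈ lines, pvScanA l [] = (pvLoopB l []).1 ∧
      (pvScanA l [] = none → (pvLoopB l []).2 = (pvBuildA l []).map pvCloseOf) := by
    intro l hm
    have h := pvLine_fst l [] (h2 l hm)
    refine ⟨by simpa using h.1, fun hn => ?_⟩
    have h0' : pvStatus l [] = 0 := pvScan_none_status l [] (h2 l hm) hn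
    simpa using (h.2 h0').2
  have hA := pvPart1A_inv lines 0 [] (by simp)
  simp only [List.nil_append] at hA
  have hB := pvFoldB_inv lines 0 []
  simp only [List.nil_append] at hB
  -- equal error sums
  have hsum : lines.map (fun l => (pvScanA l []).getD 0) =
      lines.map (fun l => ((pvLoopB l []).1).getD 0) :=
    List.map_congr_left (fun l hm => by rw [(key l hm).1])
  -- equal filters
  have hfil : lines.filter (fun l => pvScanA l [] = none) =
      lines.filter (fun l => (pvLoopB l []).1 = none) :=
    List.filter_congr (fun l hm => by rw [(key l hm).1])
  -- equal score lists
  have hscores : (lines.filter (fun l => pvScanA l [] = none)).map (fun l => pvScoreA (pvBuildA l [])) =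
      (lines.filter (fun l => (pvLoopB l []).1 = none)).map
        (fun l => (pvLoopB l []).2.foldl (fun s e => s * 5 + pvCompScore e) 0) := by
    rw [← hfil]
    refine List.map_congr_left (fun l hm => ?_)
    rw [List.mem_filter] at hm
    have hn : pvScanA l [] = none := by simpa using hm.2
    rw [(key l hm.1).2 hn, List.foldl_map]
    rfl
  rw [hA, hB]
  simp only [hsum]
  -- nonempty filter
  have hne : (lines.filter (fun l => pvScanA l [] = none)).length ≠ 0 := by
    obtain ⟨l, hm, h0l⟩ := h0
    have hn : pvScanA l [] = none := by
      have := (pvLine_fst l [] (h2 l hm)).2 h0l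
      simpa using this.1
    intro hlen
    rw [List.length_eq_zero_iff] at hlen
    have : l ∈ lines.filter (fun l => pvScanA l [] = none) := by
      rw [List.mem_filter]; exact ⟨hm, by simp [hn]⟩
    simp [hlen] at this
  -- the two medians
  congr 1
  rw [hscores]
  congr 2
  simp only [List.length_map]
  rw [PySem.Int.floordiv_eq_ediv_of_pos (by norm_num)]
  rw [Int.tdiv_eq_ediv_of_nonneg (by omega)]
  rw [hfil]

-- ===== VERDICT (by name: the statement is the Claim_ definition above) =====
theorem day_10_spec : Claim_equal_day_10 := by
  intro input_str _ hpre
  unfold Spec_day_10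
  exact pvMain input_str hpre.1 hpre.2
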